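-- pv_equiv track=rewrite | github.com/wajdi0142/braille-converter | backend/file_handler.py | convert_to_gcode
-- ===== SOURCE A (Python) =====
-- def convert_to_gcode(text):
--     if not text.strip():
--         return "; Aucun contenu à convertir en G-code\n"
--
--     gcode_lines = []
--     gcode_lines.append("; G-code généré à partir du texte Braille")
--     gcode_lines.append("G21 ; Utiliser des unités en millimètres")
--     gcode_lines.append("G90 ; Utiliser un positionnement absolu")
--     gcode_lines.append("G0 Z5.0 ; Lever l'outil")
--     gcode_lines.append("G0 X0 Y0 ; Aller à la position initiale")
--
--     x, y = 0, 0
--     for char in text: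
--         if char == '\n':
--             y -= 5
--             x = 0
--         else:
--             gcode_lines.append(f"G0 X{x} Y{y} ; Position pour caractère")
--             gcode_lines.append("G1 Z0 ; Abaisser l'outil")
--             gcode_lines.append("G1 Z5 ; Lever l'outil")
--             x += 2
--
--     gcode_lines.append("G0 X0 Y0 ; Retour à l'origine")
--     gcode_lines.append("; Fin du G-code")
--     return "\n".join(gcode_lines)
-- ===== SOURCE B (Python) =====
-- def convert_to_gcode(text):
--     if not text.strip():
--         return "; Aucun contenu à convertir en G-code\n"
--
--     header = [
--         "; G-code généré à partir du texte Braille",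
--         "G21 ; Utiliser des unités en millimètres",
--         "G90 ; Utiliser un positionnement absolu",
--         "G0 Z5.0 ; Lever l'outil",
--         "G0 X0 Y0 ; Aller à la position initiale",
--     ]
--     footer = ["G0 X0 Y0 ; Retour à l'origine", "; Fin du G-code"]
--
--     body = []
--     for i, segment in enumerate(text.split('\n')):
--         y = -5 * i
--         for j, _ in enumerate(segment):
--             x = 2 * j
--             body.append(f"G0 X{x} Y{y} ; Position pour caractère")
--             body.append("G1 Z0 ; Abaisser l'outil")
--             body.append("G1 Z5 ; Lever l'outil")
--
--     return "\n".join(header + body + footer)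
-- ===== Notes on version B (the rewrite author's own statement) =====
-- stated objective: alternative
-- what changed: Replaces A's single character loop with mutable (x, y) state by splitting the text on newlines and computing each coordinate in closed form (x = 2*j, y = -5*i) from enumerate indices, building the body as a flat map over segments.
import Mathlib
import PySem

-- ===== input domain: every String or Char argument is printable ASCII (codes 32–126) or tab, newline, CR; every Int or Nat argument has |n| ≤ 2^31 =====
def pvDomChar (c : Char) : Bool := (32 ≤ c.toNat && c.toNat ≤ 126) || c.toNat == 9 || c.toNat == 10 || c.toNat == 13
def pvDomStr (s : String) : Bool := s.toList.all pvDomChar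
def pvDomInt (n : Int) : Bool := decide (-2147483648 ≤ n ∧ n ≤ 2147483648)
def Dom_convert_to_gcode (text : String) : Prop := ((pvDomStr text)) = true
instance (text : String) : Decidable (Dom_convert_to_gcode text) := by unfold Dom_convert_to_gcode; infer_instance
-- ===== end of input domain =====

-- B replaces A's stateful (x, y) character loop with a split-on-newline decomposition whose
-- coordinates are computed in closed form from enumerate indices (alternative decomposition).

-- ===== PORT A =====
-- A: one pass over the characters carrying (gcode_lines, x, y); '\n' resets x and lowers y.
def convert_to_gcode (text : String) : String :=
  if PySem.Str.strip text = "" then "; Aucun contenu à convertir en G-code\n"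
  else
    let init : List String × Int × Int :=
      (["; G-code généré à partir du texte Braille",
        "G21 ; Utiliser des unités en millimètres",
        "G90 ; Utiliser un positionnement absolu",
        "G0 Z5.0 ; Lever l'outil",
        "G0 X0 Y0 ; Aller à la position initiale"], 0, 0)
    let st := text.toList.foldl (fun st c =>
      if c = '\n' then (st.1, 0, st.2.2 - 5)
      else (st.1 ++
        ["G0 X" ++ PySem.Int.toStr st.2.1 ++ " Y" ++ PySem.Int.toStr st.2.2 ++ " ; Position pour caractère",
         "G1 Z0 ; Abaisser l'outil",
         "G1 Z5 ; Lever l'outil"], st.2.1 + 2, st.2.2)) init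
    PySem.Str.join "\n" (st.1 ++ ["G0 X0 Y0 ; Retour à l'origine", "; Fin du G-code"])

-- ===== PORT B =====
-- B helper: the three G-code commands emitted for the character at pen position (x, y).
def gcodeCharCmds (x y : Int) : List String :=
  ["G0 X" ++ PySem.Int.toStr x ++ " Y" ++ PySem.Int.toStr y ++ " ; Position pour caractère",
   "G1 Z0 ; Abaisser l'outil",
   "G1 Z5 ; Lever l'outil"]

-- B: split on '\n' ('str.split' with a one-char separator is List.splitOn on the char list),
-- then derive every coordinate in closed form from the enumerate indices.
def convert_to_gcode_alt (text : String) : String :=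
  if PySem.Str.strip text = "" then "; Aucun contenu à convertir en G-code\n"
  else
    let segments := text.toList.splitOn '\n'
    let body := (PySem.List.enumerate segments).flatMap (fun p =>
      (PySem.List.enumerate p.2).flatMap (fun q => gcodeCharCmds (2 * q.1) (-5 * p.1)))
    PySem.Str.join "\n"
      (["; G-code généré à partir du texte Braille",
        "G21 ; Utiliser des unités en millimètres",
        "G90 ; Utiliser un positionnement absolu",
        "G0 Z5.0 ; Lever l'outil",
        "G0 X0 Y0 ; Aller à la position initiale"]
       ++ body ++ ["G0 X0 Y0 ; Retour à l'origine", "; Fin du G-code"])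

-- ===== PRECONDITION & SPEC =====
def Spec_convert_to_gcode (text : String) (out : String) : Prop := out = convert_to_gcode_alt text
instance (text : String) (out : String) : Decidable (Spec_convert_to_gcode text out) := by unfold Spec_convert_to_gcode; infer_instance

-- ===== CLAIM (what is proved, stated in full; the proofs are below) =====
def Claim_equal_convert_to_gcode : Prop := ∀ (text : String), Dom_convert_to_gcode text → Spec_convert_to_gcode text (convert_to_gcode text)

-- ===== LEMMAS AND PROOFS =====

-- Lines A's loop appends for the remaining characters, given current pen state (x, y).
def pvBodyA : List Char → Int → Int → List String
  | [], _, _ => []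
  | c :: cs, x, y =>
    if c = '\n' then pvBodyA cs 0 (y - 5)
    else gcodeCharCmds x y ++ pvBodyA cs (x + 2) y

-- Lines for one segment starting at abscissa x.
def pvSegLines : List Char → Int → Int → List String
  | [], _, _ => []
  | _ :: s, x, y => gcodeCharCmds x y ++ pvSegLines s (x + 2) y

-- Lines for a list of segments starting at ordinate y.
def pvSegsLines : List (List Char) → Int → List String
  | [], _ => []
  | s :: rest, y => pvSegLines s 0 y ++ pvSegsLines rest (y - 5)

theorem pvFoldA (cs : List Char) : ∀ (acc : List String) (x y : Int),
    (cs.foldl (fun st c =>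
      if c = '\n' then (st.1, 0, st.2.2 - 5)
      else (st.1 ++
        ["G0 X" ++ PySem.Int.toStr st.2.1 ++ " Y" ++ PySem.Int.toStr st.2.2 ++ " ; Position pour caractère",
         "G1 Z0 ; Abaisser l'outil",
         "G1 Z5 ; Lever l'outil"], st.2.1 + 2, st.2.2))
      ((acc, x, y) : List String × Int × Int)).1 = acc ++ pvBodyA cs x y := by
  induction cs with
  | nil => intro acc x y; simp [pvBodyA]
  | cons c cs ih =>
    intro acc x y
    by_cases h : c = '\n'
    · simp [List.foldl_cons, h, pvBodyA, ih]
    · simp [List.foldl_cons, h, pvBodyA, ih, gcodeCharCmds, List.append_assoc]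

theorem pvEnumChar (s : List Char) : ∀ (k y : Int),
    (PySem.List.enumerate s k).flatMap (fun q => gcodeCharCmds (2 * q.1) y)
      = pvSegLines s (2 * k) y := by
  induction s with
  | nil => intro k y; simp [PySem.List.enumerate, pvSegLines]
  | cons c s ih =>
    intro k y
    rw [PySem.List.enumerate_cons]
    simp only [List.flatMap_cons, ih, pvSegLines]
    ring_nf

theorem pvEnumSegs (segs : List (List Char)) : ∀ (k : Int),
    (PySem.List.enumerate segs k).flatMap (fun p =>
      (PySem.List.enumerate p.2).flatMap (fun q => gcodeCharCmds (2 * q.1) (-5 * p.1)))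
      = pvSegsLines segs (-5 * k) := by
  induction segs with
  | nil => intro k; simp [PySem.List.enumerate_nil, pvSegsLines]
  | cons s rest ih =>
    intro k
    rw [PySem.List.enumerate_cons, List.flatMap_cons, ih (k + 1)]
    simp only [pvSegsLines, pvEnumChar]
    norm_num
    ring_nf
  -- segments at index k, k+1, … print at ordinates -5k, -5(k+1), …

theorem pvBodySplit (cs : List Char) : ∀ (x y : Int) (s : List Char) (rest : List (List Char)),
    cs.splitOn '\n' = s :: rest →
    pvBodyA cs x y = pvSegLines s x y ++ pvSegsLines rest (y - 5) := by
  induction cs with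
  | nil =>
    intro x y s rest h
    rw [List.splitOn, List.splitOnP_nil] at h
    obtain ⟨hs, hr⟩ := List.cons.inj h
    subst hs; subst hr
    simp [pvBodyA, pvSegLines, pvSegsLines]
  | cons c cs ih =>
    intro x y s rest h
    rw [List.splitOn, List.splitOnP_cons] at h
    obtain ⟨s', rest', h'⟩ := List.exists_cons_of_ne_nil (List.splitOnP_ne_nil (fun x => x == '\n') cs)
    have hsp : List.splitOn '\n' cs = s' :: rest' := h'
    by_cases hc : c = '\n'
    · have hb : (c == '\n') = true := by simp [hc]
      rw [hb, if_pos rfl] at h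
      obtain ⟨hs, hr⟩ := List.cons.inj h
      subst hs; subst hr
      simp only [pvBodyA, if_pos hc, pvSegLines, List.nil_append]
      rw [ih 0 (y - 5) s' rest' hsp, h']
      simp only [pvSegsLines]
    · have hb : (c == '\n') = false := by simp [hc]
      rw [hb, if_neg Bool.false_ne_true, h', List.modifyHead_cons] at h
      obtain ⟨hs, hr⟩ := List.cons.inj h
      subst hs; subst hr
      simp only [pvBodyA, if_neg hc, pvSegLines, List.append_assoc]
      rw [ih (x + 2) y s' rest' hsp]

-- ===== VERDICT (by name: the statement is the Claim_ definition above) =====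
theorem convert_to_gcode_spec : Claim_equal_convert_to_gcode := by
  intro text _
  unfold Spec_convert_to_gcode convert_to_gcode convert_to_gcode_alt
  by_cases h : PySem.Str.strip text = ""
  · simp [h]
  · simp only [h, if_neg, not_false_iff]
    congr 1
    obtain ⟨s, rest, hsp⟩ := List.exists_cons_of_ne_nil
      (List.splitOnP_ne_nil (fun x => x == '\n') text.toList :
        text.toList.splitOn '\n' ≠ [])
    have hsp2 : List.splitOn '\n' text.toList = s :: rest := hsp
    rw [pvFoldA, pvEnumSegs, pvBodySplit text.toList 0 0 s rest hsp2, hsp2]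
    norm_num [pvSegsLines]
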